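-- pv_equiv track=rewrite | github.com/913-Herlea-Stefan-Alexandru/Facultate | An1 Facultate/FP Python/a12-913-Herlea-Stefan-Alexandru/solution.py | iterative_back
-- ===== SOURCE A (Python) =====
-- def next_element(current_list, max_length):
--     '''
--     Checks if the program can advance to the next element in the list and does so if possible
--     :param current_list: the current list of indexes of elements (list of int)
--     :param max_length: the maximum length of the list (int)
--     :return: True if it can go to the next element in the list, False if it can't
--     '''
--     if current_list[-1] >= max_length-1:
--         return False
--     if len(current_list) != 1 and current_list[-1] != current_list[-2]:
--         return False
--     current_list[-1] += 1
--     return True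
--
-- def is_consistent(current_list, max_length):
--     '''
--     Checks if the current list of indexes of elements forms a consistent list for future solutions
--     :param current_list: the current list of indexes of elements (list of int)
--     :param max_length: the maximum number of elements that should be in the final list (int)
--     :return: True if the list is consistent, False if it is not
--     '''
--     if len(current_list) > max_length:
--         return False
--     return True
--
-- def is_solution(current_list, elements_list, n):
--     '''
--     Checks if the current list is a solution
--     :param current_list: the current list of indexes of elements (list of int)
--     :param elements_list: the list of actual elements that will be in the solution (list of int)
--     :param n: the number at which the sum of the elements should divide (int)
--     :return: True if it is a solution, False if it is not
--     '''
--     S = sum([elements_list[i] for i in current_list])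
--     if S % n != 0:
--         return False
--     return True
--
-- def add_solution(current_list, elements_list, solution_list):
--     '''
--     Adds the newly found solution to the solution list
--     :param current_list: the current list of indexes of elements (list of int)
--     :param elements_list: the list of elements that form a solution (list of char)
--     :param solution_list: the list of all found solutions (list of list)
--     :return: -
--     '''
--     solution = []
--     for i in current_list:
--         solution.append(elements_list[i])
--     solution_list.append(solution)
--
-- def expand(current_list):
--     '''
--     Expands the current list by adding one element
--     :param current_list: the current list of indexes of elements (list of int)
--     :return: -
--     '''
--     current_list.append(current_list[-1])
--
-- def backtrack(current_list):
--     '''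
--     Checks if the program can backtrack to the previous element in the list
--     :param current_list: the current list of indexes of elements (list of int)
--     :return: True if it can, False if it can't
--     '''
--     current_list.pop()
--     if len(current_list) == 0:
--         return False
--     return True
--
-- def iterative_back(elements_list, n, solution_list):
--     '''
--     An iterative version of the algorithm
--     :param n: the number of brackets in the solution (int)
--     :return: the whole solution list or None if there are no solutions
--     '''
--     current_list = [-1]
--     searching = True
--     while searching:
--         while next_element(current_list, len(elements_list)):
--             if is_consistent(current_list, len(elements_list)):
--                 if is_solution(current_list, elements_list, n):
--                     add_solution(current_list, elements_list, solution_list)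
--                 expand(current_list)
--         if not backtrack(current_list):
--             searching = False
--     return solution_list
-- ===== SOURCE B (Python) =====
-- def iterative_back(elements_list, n, solution_list):
--     # A only ever emits contiguous runs elements_list[i..j] (its next_element
--     # refuses to advance unless the two top stack indexes are equal), in order
--     # of increasing i then j.  B enumerates those segments directly with a
--     # running sum, appending to solution_list in place just like A.
--     m = len(elements_list)
--     for i in range(m):
--         s = 0
--         for j in range(i, m):
--             s += elements_list[j]
--             if s % n == 0:
--                 solution_list.append(elements_list[i:j + 1])
--     return solution_list
-- ===== Notes on version B (the rewrite author's own statement) =====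
-- stated objective: faster
-- what changed: Replaced the stack-machine iterative backtracking (which in fact only ever visits contiguous index runs) by two nested loops over segment endpoints with a running sum, appending each qualifying slice directly; Pre_ excludes n == 0 with nonempty elements_list, where both versions raise ZeroDivisionError.
import Mathlib
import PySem

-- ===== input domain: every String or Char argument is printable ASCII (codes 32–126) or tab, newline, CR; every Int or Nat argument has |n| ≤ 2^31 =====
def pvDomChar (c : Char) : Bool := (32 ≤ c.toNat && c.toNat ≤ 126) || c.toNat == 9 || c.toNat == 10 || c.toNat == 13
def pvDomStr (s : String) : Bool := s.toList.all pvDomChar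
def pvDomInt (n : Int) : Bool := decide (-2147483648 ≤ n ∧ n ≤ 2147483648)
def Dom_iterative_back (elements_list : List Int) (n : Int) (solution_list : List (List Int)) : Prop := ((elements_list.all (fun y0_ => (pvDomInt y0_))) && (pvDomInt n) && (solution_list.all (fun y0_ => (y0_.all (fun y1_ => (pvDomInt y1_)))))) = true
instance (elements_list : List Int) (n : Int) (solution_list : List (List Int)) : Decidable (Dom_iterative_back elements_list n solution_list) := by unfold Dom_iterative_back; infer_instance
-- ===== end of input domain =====

-- B replaces A's stack-machine backtracking (which only ever visits contiguous index
-- runs) by two nested endpoint loops with a running sum; both mutate solution_list in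
-- place in Python (same appends, same order), so return-value equivalence is the whole story.

-- ===== PORT A =====
-- Python's current_list is stored REVERSED (head = Python's last element), so the
-- tail-end operations [-1], [-2], append, pop are head operations; values are identical.

-- elements_list[i]; on every reachable call the index is in range (Python would raise IndexError otherwise)
def pvElem (elements_list : List Int) (i : Int) : Int := (PySem.List.pyGet? elements_list i).getD 0

-- next_element: returns (the Python return value, current_list after the call);
-- the [] case is Python's IndexError on an empty list, which the loops never reach
def pvNextElement (current_list : List Int) (max_length : Int) : Bool × List Int :=
  match current_list with
  | [] => (false, [])
  | x :: rest =>
    if x ≥ max_length - 1 then (false, x :: rest)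
    else
      match rest with
      | [] => (true, (x + 1) :: rest)
      | y :: t => if x ≠ y then (false, x :: y :: t) else (true, (x + 1) :: y :: t)

def pvIsConsistent (current_list : List Int) (max_length : Int) : Bool :=
  if (current_list.length : Int) > max_length then false else true

-- is_solution; sum([elements_list[i] for i in current_list]) iterates in Python order,
-- hence the .reverse.  n = 0 is Python's ZeroDivisionError, excluded by Pre_ below.
def pvIsSolution (current_list : List Int) (elements_list : List Int) (n : Int) : Bool :=
  if PySem.Int.mod ((current_list.reverse.map (pvElem elements_list)).sum) n ≠ 0 then false else true

def pvAddSolution (current_list : List Int) (elements_list : List Int) (solution_list : List (List Int)) : List (List Int) :=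
  solution_list ++ [current_list.reverse.map (pvElem elements_list)]

-- expand: append a copy of the last element ([] is Python's IndexError, never reached)
def pvExpand (current_list : List Int) : List Int :=
  match current_list with
  | [] => []
  | x :: t => x :: x :: t

-- the inner 'while next_element(...)' loop; fuel only makes it total
def pvInnerLoop (elements_list : List Int) (n : Int) (max_length : Int) : Nat → List Int → List (List Int) → List Int × List (List Int)
  | 0, current_list, solution_list => (current_list, solution_list)
  | fuel + 1, current_list, solution_list =>
    let r := pvNextElement current_list max_length
    if r.1 then
      if pvIsConsistent r.2 max_length then
        pvInnerLoop elements_list n max_length fuel (pvExpand r.2)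
          (if pvIsSolution r.2 elements_list n then pvAddSolution r.2 elements_list solution_list else solution_list)
      else
        pvInnerLoop elements_list n max_length fuel r.2 solution_list
    else (r.2, solution_list)

-- the outer 'while searching' loop; backtrack = pop, stop when the stack empties
def pvOuterLoop (elements_list : List Int) (n : Int) (max_length : Int) : Nat → List Int → List (List Int) → List (List Int)
  | 0, _, solution_list => solution_list
  | fuel + 1, current_list, solution_list =>
    let p := pvInnerLoop elements_list n max_length (fuel + 1) current_list solution_list
    if p.1.tail.isEmpty then p.2 else pvOuterLoop elements_list n max_length fuel p.1.tail p.2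

def iterative_back (elements_list : List Int) (n : Int) (solution_list : List (List Int)) : List (List Int) :=
  -- fuel (m+1)^2+2 is proven sufficient for the while-loop below (outer_tail lemma)
  pvOuterLoop elements_list n (elements_list.length : Int)
    ((elements_list.length + 1) * (elements_list.length + 1) + 2) [-1] solution_list

-- ===== PORT B =====
-- inner 'for j in range(i, m)' with running sum s
def altInner (elements_list : List Int) (n : Int) (m i : Nat) (j : Nat) (s : Int) (sol : List (List Int)) : List (List Int) :=
  if j < m then
    let s' := s + (PySem.List.pyGet? elements_list (j : Int)).getD 0
    altInner elements_list n m i (j + 1) s'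
      (if PySem.Int.mod s' n = 0 then sol ++ [PySem.List.slice elements_list (some (i : Int)) (some ((j : Int) + 1))] else sol)
  else sol
  termination_by m - j
  decreasing_by omega

-- outer 'for i in range(m)'
def altOuter (elements_list : List Int) (n : Int) (m : Nat) (i : Nat) (sol : List (List Int)) : List (List Int) :=
  if i < m then
    altOuter elements_list n m (i + 1) (altInner elements_list n m i i 0 sol)
  else sol
  termination_by m - i
  decreasing_by omega

def iterative_back_alt (elements_list : List Int) (n : Int) (solution_list : List (List Int)) : List (List Int) :=
  altOuter elements_list n elements_list.length 0 solution_list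

-- ===== PRECONDITION & SPEC =====
-- Pre_ excludes exactly the inputs where the Python A raises (ZeroDivisionError in the
-- 'S % n' test, reached iff elements_list is nonempty); B raises there too.
def Pre_iterative_back (elements_list : List Int) (n : Int) (solution_list : List (List Int)) : Prop :=
  n ≠ 0 ∨ elements_list = []
instance (elements_list : List Int) (n : Int) (solution_list : List (List Int)) : Decidable (Pre_iterative_back elements_list n solution_list) := by unfold Pre_iterative_back; infer_instance

def pvWitness_iterative_back : List Int × Int × List (List Int) := ([1, 2, 3], 2, [])

def Spec_iterative_back (elements_list : List Int) (n : Int) (solution_list : List (List Int)) (out : List (List Int)) : Prop := out = iterative_back_alt elements_list n solution_list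
instance (elements_list : List Int) (n : Int) (solution_list : List (List Int)) (out : List (List Int)) : Decidable (Spec_iterative_back elements_list n solution_list out) := by unfold Spec_iterative_back; infer_instance

-- ===== CLAIM (what is proved, stated in full; the proofs are below) =====
def Claim_equal_iterative_back : Prop := ∀ (elements_list : List Int) (n : Int) (solution_list : List (List Int)), Dom_iterative_back elements_list n solution_list → Pre_iterative_back elements_list n solution_list → Spec_iterative_back elements_list n solution_list (iterative_back elements_list n solution_list)

-- ===== LEMMAS AND PROOFS =====

-- the reversed stack [j, j-1, …, i] (A's current_list for the contiguous run i..j)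
def revStk (i j : Int) : List Int :=
  if j < i then [] else j :: revStk i (j - 1)
  termination_by (j + 1 - i).toNat
  decreasing_by omega

-- the segment value [el[i], …, el[j]] as A emits it
def pvSeg (el : List Int) (i j : Int) : List Int := (revStk i j).reverse.map (pvElem el)

def pvSum (el : List Int) (i j : Int) : Int := ((revStk i j).map (pvElem el)).sum

-- the solutions among segments i..t for t = j+1, …, m-1
def chainSegs (el : List Int) (n m : Int) (i j : Int) : List (List Int) :=
  if m - 1 ≤ j then []
  else (if pvIsSolution (revStk i (j + 1)) el n then [pvSeg el i (j + 1)] else []) ++ chainSegs el n m i (j + 1)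
  termination_by (m - 1 - j).toNat
  decreasing_by omega

-- the solutions among all segments starting at an index > i
def tailSegs (el : List Int) (n m : Int) (i : Int) : List (List Int) :=
  if m - 1 ≤ i then []
  else chainSegs el n m (i + 1) i ++ tailSegs el n m (i + 1)
  termination_by (m - 1 - i).toNat
  decreasing_by omega

theorem revStk_nil (i j : Int) (h : j < i) : revStk i j = [] := by
  rw [revStk, if_pos h]

theorem revStk_cons (i j : Int) (h : i ≤ j) : revStk i j = j :: revStk i (j - 1) := by
  rw [revStk, if_neg (by omega)]

theorem length_revStk (i j : Int) : (revStk i j).length = (j + 1 - i).toNat := by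
  induction j using revStk.induct (i := i) with
  | case1 j h => rw [revStk_nil i j h]; simp; omega
  | case2 j h ih => rw [revStk_cons i j (by omega)]; simp [ih]; omega
theorem inner_chain (el : List Int) (n m : Int) :
    ∀ (fuel : Nat) (i j : Int) (sol : List (List Int)), 0 ≤ i → i ≤ j → j ≤ m - 1 →
      m - 1 - j < (fuel : Int) →
      pvInnerLoop el n m fuel (j :: revStk i j) sol
        = ((m - 1) :: revStk i (m - 1), sol ++ chainSegs el n m i j) := by
  intro fuel
  induction fuel with
  | zero => intro i j sol h0 hij hjm hf; exact absurd hf (by push_cast; omega)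
  | succ f ih =>
    intro i j sol h0 hij hjm hf
    by_cases hend : m - 1 ≤ j
    · have hj : j = m - 1 := by omega
      subst hj
      rw [pvInnerLoop, chainSegs, if_pos hend]
      simp [pvNextElement]
    · have hstk : revStk i (j + 1) = (j + 1) :: j :: revStk i (j - 1) := by
        rw [revStk_cons i (j + 1) (by omega)]
        norm_num
        rw [revStk_cons i j hij]
      have hnext : pvNextElement (j :: (j :: revStk i (j - 1))) m
          = (true, (j + 1) :: j :: revStk i (j - 1)) := by
        simp [pvNextElement, show ¬ j ≥ m - 1 by omega]
      have hcons : pvIsConsistent ((j + 1) :: j :: revStk i (j - 1)) m = true := by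
        simp [pvIsConsistent, length_revStk]
        omega
      have hstep : pvInnerLoop el n m (f + 1) (j :: revStk i j) sol
          = pvInnerLoop el n m f ((j + 1) :: revStk i (j + 1))
              (if pvIsSolution (revStk i (j + 1)) el n then sol ++ [pvSeg el i (j + 1)] else sol) := by
        rw [pvInnerLoop, revStk_cons i j hij]
        simp only [hnext, hcons, if_true, pvExpand, pvAddSolution, pvSeg, hstk]
      rw [hstep, ih i (j + 1) _ (by omega) (by omega) (by omega) (by omega)]
      conv_rhs => rw [chainSegs]
      rw [if_neg hend]
      by_cases hsol : pvIsSolution (revStk i (j + 1)) el n = true <;>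
        simp [hsol, List.append_assoc]
theorem outer_tail (el : List Int) (n m : Int) :
    ∀ (fuel : Nat) (i j : Int) (sol : List (List Int)), -1 ≤ i → i ≤ j → j ≤ m - 1 →
      (j - i) + (m - i) * (m + 1) + 1 ≤ (fuel : Int) →
      pvOuterLoop el n m fuel (revStk i j) sol = sol ++ tailSegs el n m i := by
  intro fuel
  induction fuel with
  | zero =>
    intro i j sol h0 hij hjm hf
    exfalso
    have h2 : (0 : Int) ≤ (m - i) * (m + 1) := mul_nonneg (by omega) (by omega)
    omega
  | succ f ih =>
    intro i j sol h0 hij hjm hf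
    by_cases hji : i < j
    · -- i < j: next_element fails at once (top two entries differ), pop
      have hstk : revStk i j = j :: (j - 1) :: revStk i (j - 2) := by
        rw [revStk_cons i j hij, revStk_cons i (j - 1) (by omega),
          show j - 1 - 1 = j - 2 from by ring]
      have hnext : pvNextElement (j :: (j - 1) :: revStk i (j - 2)) m
          = (false, j :: (j - 1) :: revStk i (j - 2)) := by
        by_cases hj : j ≥ m - 1 <;> simp [pvNextElement, hj] <;> omega
      rw [pvOuterLoop, hstk]
      rw [pvInnerLoop]
      simp only [hnext]
      have hne : ((j - 1) :: revStk i (j - 2)).isEmpty = false := by simp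
      simp only [List.tail_cons, hne, Bool.false_eq_true, if_false]
      have hback : (j - 1) :: revStk i (j - 2) = revStk i (j - 1) := by
        rw [revStk_cons i (j - 1) (by omega), show j - 1 - 1 = j - 2 from by ring]
      rw [hback]
      exact ih i (j - 1) sol h0 (by omega) (by omega) (by push_cast at hf ⊢; omega)
    · -- i = j: singleton
      have hj : j = i := by omega
      subst hj
      have hstk : revStk j j = [j] := by
        rw [revStk_cons j j le_rfl, revStk_nil j (j - 1) (by omega)]
      by_cases hdone : m - 1 ≤ j
      · -- next_element False, pop empties the stack: the search ends
        rw [pvOuterLoop, hstk, pvInnerLoop]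
        simp [pvNextElement, show j ≥ m - 1 by omega, tailSegs]
      · -- advance to [j+1], visit it, expand, run the inner chain, then pop
        have hnext : pvNextElement [j] m = (true, [j + 1]) := by
          simp [pvNextElement]; omega
        have hcons : pvIsConsistent [j + 1] m = true := by
          simp [pvIsConsistent]; omega
        have hone : [(j : Int) + 1] = revStk (j + 1) (j + 1) := by
          rw [revStk_cons (j + 1) (j + 1) le_rfl, show j + 1 - 1 = j from by ring,
            revStk_nil (j + 1) j (by omega)]
        have hstep : pvInnerLoop el n m (f + 1) (revStk j j) sol
            = pvInnerLoop el n m f ((j + 1) :: revStk (j + 1) (j + 1))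
                (if pvIsSolution (revStk (j + 1) (j + 1)) el n then sol ++ [pvSeg el (j + 1) (j + 1)] else sol) := by
          rw [hstk, pvInnerLoop]
          simp only [hnext, hone.symm, hcons, if_true, pvExpand, pvAddSolution, pvSeg]
        have hchain := inner_chain el n m f (j + 1) (j + 1)
          (if pvIsSolution (revStk (j + 1) (j + 1)) el n then sol ++ [pvSeg el (j + 1) (j + 1)] else sol)
          (by omega) le_rfl (by omega)
          (by
            have h1 : (1 : Int) ≤ m - j := by omega
            have h2 : m - j ≤ (m - j) * (m + 1) := le_mul_of_one_le_right (by omega) (by omega)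
            push_cast at hf ⊢; omega)
        rw [pvOuterLoop, hstep, hchain]
        have hne : (revStk (j + 1) (m - 1)).isEmpty = false := by
          rw [revStk_cons (j + 1) (m - 1) (by omega)]; simp
        simp only [List.tail_cons, hne, Bool.false_eq_true, if_false]
        have hrec := ih (j + 1) (m - 1)
          ((if pvIsSolution (revStk (j + 1) (j + 1)) el n then sol ++ [pvSeg el (j + 1) (j + 1)] else sol)
            ++ chainSegs el n m (j + 1) (j + 1)) (by omega) (by omega) le_rfl
          (by
            have hexp : (m - j) * (m + 1) = (m - (j + 1)) * (m + 1) + (m + 1) := by ring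
            push_cast at hf ⊢; omega)
        rw [hrec]
        conv_rhs => rw [tailSegs]
        rw [if_neg hdone]
        conv_rhs => rw [chainSegs]
        rw [if_neg hdone]
        by_cases hsol : pvIsSolution (revStk (j + 1) (j + 1)) el n = true <;>
          simp [hsol, List.append_assoc]
theorem pvSeg_snoc (el : List Int) (i j : Int) (h : i ≤ j) :
    pvSeg el i j = pvSeg el i (j - 1) ++ [pvElem el j] := by
  unfold pvSeg
  rw [revStk_cons i j h]
  simp

theorem pvSum_snoc (el : List Int) (i j : Int) (h : i ≤ j) :
    pvSum el i j = pvSum el i (j - 1) + pvElem el j := by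
  unfold pvSum
  rw [revStk_cons i j h]
  simp
  ring

theorem pvSum_nil (el : List Int) (i j : Int) (h : j < i) : pvSum el i j = 0 := by
  unfold pvSum
  rw [revStk_nil i j h]
  simp

theorem isSolution_sum (el : List Int) (n i j : Int) :
    pvIsSolution (revStk i j) el n = (PySem.Int.mod (pvSum el i j) n == 0) := by
  unfold pvIsSolution pvSum
  rw [List.map_reverse, List.sum_reverse]
  by_cases h : PySem.Int.mod ((List.map (pvElem el) (revStk i j)).sum) n = 0 <;> simp [h]

theorem seg_slice_aux (el : List Int) : ∀ (d i : Nat), i + d < el.length →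
    (el.drop i).take (d + 1) = pvSeg el (i : Int) ((i : Int) + (d : Int)) := by
  intro d
  induction d with
  | zero =>
    intro i h
    rw [List.take_succ]
    have : pvSeg el (i : Int) ((i : Int) + ((0 : Nat) : Int)) = [pvElem el (i : Int)] := by
      norm_num [pvSeg]
      rw [revStk_cons (i : Int) (i : Int) le_rfl, revStk_nil (i : Int) ((i : Int) - 1) (by omega)]
      simp
    rw [this]
    have hg : el[i]? = some el[i] := List.getElem?_eq_getElem (by omega)
    simp [List.getElem?_drop, pvElem, hg]
  | succ d ihd =>
    intro i h
    rw [List.take_succ, ihd i (by omega)]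
    have hsnoc := pvSeg_snoc el (i : Int) ((i : Int) + ((d : Nat) + 1 : Nat)) (by push_cast; omega)
    rw [show ((i : Int) + (((d : Nat) + 1 : Nat) : Int)) - 1 = (i : Int) + ((d : Nat) : Int) from by push_cast; ring] at hsnoc
    rw [hsnoc]
    congr 1
    have hg : el[i + (d + 1)]? = some el[i + (d + 1)] := List.getElem?_eq_getElem (by omega)
    simp [List.getElem?_drop, pvElem]
    have hpg := PySem.List.pyGet?_of_nonneg (xs := el)
      (i := (i : Int) + ((d : Int) + 1)) (by positivity)
    rw [hpg, show ((i : Int) + ((d : Int) + 1)).toNat = i + (d + 1) from by omega, hg]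
    rfl

theorem seg_slice (el : List Int) (i j : Nat) (hj : j < el.length) (hij : i ≤ j) :
    PySem.List.slice el (some (i : Int)) (some ((j : Int) + 1)) = pvSeg el i j := by
  have hd := seg_slice_aux el (j - i) i (by omega)
  rw [show (i : Int) + ((j - i : Nat) : Int) = (j : Int) from by
    push_cast [Nat.cast_sub hij]; ring] at hd
  rw [show ((j : Int) + 1) = (((j + 1 : Nat)) : Int) from by push_cast; ring,
    PySem.List.slice_natCast, show j + 1 - i = (j - i) + 1 from by omega]
  exact hd

theorem alt_inner_chain (el : List Int) (n : Int) (i : Nat) :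
    ∀ (k j : Nat) (sol : List (List Int)), el.length - j ≤ k → i ≤ j →
      altInner el n el.length i j (pvSum el i ((j : Int) - 1)) sol
        = sol ++ chainSegs el n el.length i ((j : Int) - 1) := by
  intro k
  induction k with
  | zero =>
    intro j sol hk hij
    have hj : ¬ j < el.length := by omega
    rw [altInner, if_neg hj, chainSegs, if_pos (by push_cast; omega)]
    simp
  | succ k ihk =>
    intro j sol hk hij
    by_cases hj : j < el.length
    · rw [altInner, if_pos hj]
      have hsum : pvSum el i ((j : Int) - 1) + (PySem.List.pyGet? el (j : Int)).getD 0
          = pvSum el i (j : Int) := by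
        rw [pvSum_snoc el i (j : Int) (by exact_mod_cast hij)]
        rfl
      rw [hsum]
      have hrec := ihk (j + 1) (if PySem.Int.mod (pvSum el i (j : Int)) n = 0
          then sol ++ [PySem.List.slice el (some (i : Int)) (some ((j : Int) + 1))] else sol)
        (by omega) (by omega)
      rw [show (((j + 1 : Nat)) : Int) - 1 = (j : Int) from by push_cast; ring] at hrec
      rw [hrec]
      have hguard : ¬ ((el.length : Int) - 1 ≤ (j : Int) - 1) := by push_cast; omega
      conv_rhs => rw [chainSegs]
      rw [if_neg hguard, show (j : Int) - 1 + 1 = (j : Int) from by ring]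
      rw [isSolution_sum, seg_slice el i j hj hij]
      by_cases hsol : PySem.Int.mod (pvSum el i (j : Int)) n = 0 <;>
        simp [hsol, List.append_assoc]
    · rw [altInner, if_neg hj, chainSegs, if_pos (by push_cast; omega)]
      simp

theorem alt_outer_tail (el : List Int) (n : Int) :
    ∀ (k i : Nat) (sol : List (List Int)), el.length - i ≤ k →
      altOuter el n el.length i sol = sol ++ tailSegs el n el.length ((i : Int) - 1) := by
  intro k
  induction k with
  | zero =>
    intro i sol hk
    rw [altOuter, if_neg (by omega), tailSegs, if_pos (by push_cast; omega)]
    simp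
  | succ k ihk =>
    intro i sol hk
    by_cases hi : i < el.length
    · rw [altOuter, if_pos hi]
      have h0 : (0 : Int) = pvSum el i ((i : Int) - 1) := (pvSum_nil el i ((i : Int) - 1) (by omega)).symm
      rw [h0, alt_inner_chain el n i (el.length - i) i sol (by omega) le_rfl]
      rw [ihk (i + 1) _ (by omega)]
      rw [show (((i + 1 : Nat)) : Int) - 1 = (i : Int) from by push_cast; ring]
      conv_rhs => rw [tailSegs]
      rw [if_neg (by push_cast; omega), show (i : Int) - 1 + 1 = (i : Int) from by ring]
      simp [List.append_assoc]
    · rw [altOuter, if_neg hi, tailSegs, if_pos (by push_cast; omega)]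
      simp

theorem main_eq (el : List Int) (n : Int) (sol : List (List Int)) :
    iterative_back el n sol = iterative_back_alt el n sol := by
  unfold iterative_back iterative_back_alt
  have hstk : [(-1 : Int)] = revStk (-1) (-1) := by
    rw [revStk_cons (-1) (-1) le_rfl, revStk_nil (-1) (-1 - 1) (by omega)]
  rw [hstk]
  rw [outer_tail el n (el.length : Int) _ (-1) (-1) sol (by omega) le_rfl (by omega)
    (by push_cast; nlinarith [Int.natCast_nonneg el.length])]
  rw [alt_outer_tail el n el.length 0 sol (by omega)]
  norm_num

-- ===== VERDICT (by name: the statement is the Claim_ definition above) =====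
theorem iterative_back_spec : Claim_equal_iterative_back := by
  intro el n sol _ _
  show iterative_back el n sol = iterative_back_alt el n sol
  exact main_eq el n sol
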